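-- pv_equiv track=rewrite | github.com/Fixx910/Trabajos-y-proyectos | BuscadorPalabrasAutomata/buscapalabras.py | encontrar_posiciones
-- ===== SOURCE A (Python) =====
-- import string
--
-- def encontrar_posiciones(texto, estados, estado_inicial):
--     estado_actual = [estado_inicial]  # Cambiar el estado actual a una lista de estados
--     parrafo = 1
--     palabra = 1
--     posiciones = []
--
--     palabra_actual = ""
--     for caracter in texto:
--         if caracter.isspace() or caracter in string.punctuation:
--             for estado in estado_actual:  # Iterar sobre todos los estados actuales
--                 if estado in estados:
--                     if 't' in estados[estado]:  # Verificar si estamos en un estado de aceptación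
--                         posiciones.append((parrafo, palabra, palabra_actual))
--             estado_actual = [estado_inicial]
--             palabra += 1
--             palabra_actual = ""
--             if caracter == '\n':
--                 parrafo += 1
--                 palabra = 1
--         else:
--             nuevos_estados = []
--             for estado in estado_actual:  # Iterar sobre todos los estados actuales
--                 if estado in estados and caracter in estados[estado]:
--                     nuevos_estados.extend(estados[estado][caracter])
--             estado_actual = nuevos_estados
--             palabra_actual += caracter
--
--     return posiciones
-- ===== SOURCE B (Python) =====
-- import string
--
-- def encontrar_posiciones(texto, estados, estado_inicial):
--     # Phase 1: segment the text into (parrafo, palabra, word) records.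
--     words = []
--     parrafo = 1
--     palabra = 1
--     actual = ""
--     for c in texto:
--         if c.isspace() or c in string.punctuation:
--             words.append((parrafo, palabra, actual))
--             if c == '\n':
--                 parrafo += 1
--                 palabra = 1
--             else:
--                 palabra += 1
--             actual = ""
--         else:
--             actual += c
--     # Phase 2: simulate the NFA over each recorded word.
--     posiciones = []
--     for (p, w, word) in words:
--         states = [estado_inicial]
--         for c in word:
--             nxt = []
--             for s in states:
--                 if s in estados and c in estados[s]:
--                     nxt.extend(estados[s][c])
--             states = nxt
--         for s in states:
--             if s in estados and 't' in estados[s]: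
--                 posiciones.append((p, w, word))
--     return posiciones
-- ===== Notes on version B (the rewrite author's own statement) =====
-- stated objective: alternative
-- what changed: A interleaves NFA simulation with text scanning in one pass; B first segments the text into (parrafo, palabra, word) records and then simulates the NFA over each recorded word separately (build-then-simulate two-phase structure).
import Mathlib
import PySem

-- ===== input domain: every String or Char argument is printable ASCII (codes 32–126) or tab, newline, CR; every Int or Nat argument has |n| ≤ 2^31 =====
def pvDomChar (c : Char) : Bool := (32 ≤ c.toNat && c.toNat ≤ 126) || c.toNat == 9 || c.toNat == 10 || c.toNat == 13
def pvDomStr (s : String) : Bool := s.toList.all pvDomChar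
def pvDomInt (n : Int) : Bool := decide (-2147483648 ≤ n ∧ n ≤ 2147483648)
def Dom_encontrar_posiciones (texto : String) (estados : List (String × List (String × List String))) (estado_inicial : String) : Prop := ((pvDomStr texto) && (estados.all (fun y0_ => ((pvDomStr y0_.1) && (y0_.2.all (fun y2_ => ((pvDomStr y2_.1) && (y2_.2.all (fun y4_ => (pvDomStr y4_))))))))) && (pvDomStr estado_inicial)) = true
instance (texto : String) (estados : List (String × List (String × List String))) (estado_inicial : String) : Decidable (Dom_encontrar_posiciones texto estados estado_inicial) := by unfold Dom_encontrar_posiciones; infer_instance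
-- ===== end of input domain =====

-- B restructures A's single interleaved scan into two phases: segment the text into
-- (parrafo, palabra, word) records first, then simulate the NFA over each recorded word.

-- string.punctuation
def pvPunct : List Char := ['!','\"','#','$','%','&','\'','(',')','*','+',',','-','.','/',':',';','<','=','>','?','@','[','\\',']','^','_','`','{','|','}','~']

-- separator test: caracter.isspace() or caracter in string.punctuation
def pvSep (c : Char) : Bool := PySem.Chars.isspace c || pvPunct.contains c

-- python dict lookup on an association list (first match)
def pvGet? {α : Type} (d : List (String × α)) (k : String) : Option α :=
  match d with
  | [] => none
  | (k', v) :: r => if k' = k then some v else pvGet? r k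

-- 'estado in estados and 't' in estados[estado]'
def pvAccept (estados : List (String × List (String × List String))) (s : String) : Bool :=
  match pvGet? estados s with
  | some d => (pvGet? d "t").isSome
  | none => false

-- ===== PORT A =====
-- one step of A's interleaved loop; state = (estado_actual, parrafo, palabra, posiciones, palabra_actual)
def pvStepA (estados : List (String × List (String × List String))) (estado_inicial : String)
    (st : List String × Int × Int × List (Int × Int × String) × List Char) (c : Char) :
    List String × Int × Int × List (Int × Int × String) × List Char :=
  let (estado_actual, parrafo, palabra, posiciones, palabra_actual) := st
  if pvSep c then
    let posiciones := estado_actual.foldl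
      (fun acc estado => if pvAccept estados estado then acc ++ [(parrafo, palabra, String.mk palabra_actual)] else acc)
      posiciones
    if c = '\n' then ([estado_inicial], parrafo + 1, 1, posiciones, ([] : List Char))
    else ([estado_inicial], parrafo, palabra + 1, posiciones, ([] : List Char))
  else
    let nuevos := estado_actual.foldl
      (fun acc estado =>
        match pvGet? estados estado with
        | some d =>
          match pvGet? d (String.mk [c]) with
          | some ts => acc ++ ts
          | none => acc
        | none => acc) []
    (nuevos, parrafo, palabra, posiciones, palabra_actual ++ [c])

def encontrar_posiciones (texto : String) (estados : List (String × List (String × List String))) (estado_inicial : String) : List (Int × Int × String) :=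
  (texto.toList.foldl (pvStepA estados estado_inicial) ([estado_inicial], 1, 1, [], [])).2.2.2.1

-- ===== PORT B =====
-- phase-1 step: accumulate (parrafo, palabra, word) records; state = (words, parrafo, palabra, actual)
def pvStepB (st : List (Int × Int × List Char) × Int × Int × List Char) (c : Char) :
    List (Int × Int × List Char) × Int × Int × List Char :=
  let (words, parrafo, palabra, actual) := st
  if pvSep c then
    let words := words ++ [(parrafo, palabra, actual)]
    if c = '\n' then (words, parrafo + 1, 1, ([] : List Char))
    else (words, parrafo, palabra + 1, ([] : List Char))
  else (words, parrafo, palabra, actual ++ [c])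

-- NFA transition on one character from a list of states
def pvNfaStep (estados : List (String × List (String × List String))) (sts : List String) (c : Char) : List String :=
  sts.foldl
    (fun acc estado =>
      match pvGet? estados estado with
      | some d =>
        match pvGet? d (String.mk [c]) with
        | some ts => acc ++ ts
        | none => acc
      | none => acc) []

def encontrar_posiciones_alt (texto : String) (estados : List (String × List (String × List String))) (estado_inicial : String) : List (Int × Int × String) :=
  let ph1 := texto.toList.foldl pvStepB ([], 1, 1, [])
  ph1.1.foldl
    (fun posiciones pw =>
      let (p, w, word) := pw
      let final := word.foldl (pvNfaStep estados) [estado_inicial]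
      final.foldl (fun acc s => if pvAccept estados s then acc ++ [(p, w, String.mk word)] else acc) posiciones)
    []

-- ===== PRECONDITION & SPEC =====
def Spec_encontrar_posiciones (texto : String) (estados : List (String × List (String × List String))) (estado_inicial : String) (out : List (Int × Int × String)) : Prop := out = encontrar_posiciones_alt texto estados estado_inicial
instance (texto : String) (estados : List (String × List (String × List String))) (estado_inicial : String) (out : List (Int × Int × String)) : Decidable (Spec_encontrar_posiciones texto estados estado_inicial out) := by unfold Spec_encontrar_posiciones; infer_instance

-- ===== CLAIM (what is proved, stated in full; the proofs are below) =====
def Claim_equal_encontrar_posiciones : Prop := ∀ (texto : String) (estados : List (String × List (String × List String))) (estado_inicial : String), Dom_encontrar_posiciones texto estados estado_inicial → Spec_encontrar_posiciones texto estados estado_inicial (encontrar_posiciones texto estados estado_inicial)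

-- ===== LEMMAS AND PROOFS =====

-- B's phase-2 body applied to one word record, starting from the empty accumulator
def pvEmit (estados : List (String × List (String × List String))) (estado_inicial : String)
    (pw : Int × Int × List Char) : List (Int × Int × String) :=
  let (p, w, word) := pw
  (word.foldl (pvNfaStep estados) [estado_inicial]).foldl
    (fun acc s => if pvAccept estados s then acc ++ [(p, w, String.mk word)] else acc) []

-- B's phase-2 fold over a list of word records
def pvEval (estados : List (String × List (String × List String))) (estado_inicial : String)
    (ws : List (Int × Int × List Char)) : List (Int × Int × String) :=
  ws.foldl
    (fun posiciones pw =>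
      let (p, w, word) := pw
      let final := word.foldl (pvNfaStep estados) [estado_inicial]
      final.foldl (fun acc s => if pvAccept estados s then acc ++ [(p, w, String.mk word)] else acc) posiciones)
    []

theorem foldl_if_out {α β : Type} (p : β → Bool) (v : α) :
    ∀ (l : List β) (acc : List α),
      l.foldl (fun a x => if p x then a ++ [v] else a) acc
        = acc ++ l.foldl (fun a x => if p x then a ++ [v] else a) [] := by
  intro l
  induction l with
  | nil => intro acc; simp
  | cons h t ih =>
    intro acc
    simp only [List.foldl_cons]
    cases hp : p h
    · simp only [Bool.false_eq_true, if_false]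
      exact ih acc
    · simp only [if_true]
      rw [ih (acc ++ [v]), ih ([] ++ [v])]
      simp

theorem pvEval_snoc (estados : List (String × List (String × List String))) (estado_inicial : String)
    (ws : List (Int × Int × List Char)) (t : Int × Int × List Char) :
    pvEval estados estado_inicial (ws ++ [t])
      = pvEval estados estado_inicial ws ++ pvEmit estados estado_inicial t := by
  obtain ⟨p, w, word⟩ := t
  simp only [pvEval, pvEmit, List.foldl_append, List.foldl_cons, List.foldl_nil]
  exact foldl_if_out _ _ _ _

-- main invariant: A's loop state is determined by B's phase-1 state
theorem pv_main (estados : List (String × List (String × List String))) (estado_inicial : String) :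
    ∀ (cs : List Char) (words : List (Int × Int × List Char)) (p w : Int) (cur : List Char),
      cs.foldl (pvStepA estados estado_inicial)
          (cur.foldl (pvNfaStep estados) [estado_inicial], p, w, pvEval estados estado_inicial words, cur)
        = (let sb := cs.foldl pvStepB (words, p, w, cur)
           (sb.2.2.2.foldl (pvNfaStep estados) [estado_inicial], sb.2.1, sb.2.2.1,
            pvEval estados estado_inicial sb.1, sb.2.2.2)) := by
  intro cs
  induction cs with
  | nil => intro words p w cur; rfl
  | cons c rest ih =>
    intro words p w cur
    simp only [List.foldl_cons]
    by_cases hs : pvSep c = true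
    · have key :
          (cur.foldl (pvNfaStep estados) [estado_inicial]).foldl
              (fun acc s => if pvAccept estados s then acc ++ [(p, w, String.mk cur)] else acc)
              (pvEval estados estado_inicial words)
            = pvEval estados estado_inicial (words ++ [(p, w, cur)]) := by
        rw [pvEval_snoc]
        simp only [pvEmit]
        exact foldl_if_out _ _ _ _
      by_cases hn : c = '\n'
      · subst hn
        have hA : pvStepA estados estado_inicial
            (cur.foldl (pvNfaStep estados) [estado_inicial], p, w, pvEval estados estado_inicial words, cur) '\n'
            = ([estado_inicial], p + 1, 1, pvEval estados estado_inicial (words ++ [(p, w, cur)]), ([] : List Char)) := by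
          simp only [pvStepA]
          rw [if_pos hs]
          simp only [if_true]
          rw [key]
        have hB : pvStepB (words, p, w, cur) '\n' = (words ++ [(p, w, cur)], p + 1, 1, ([] : List Char)) := by
          simp only [pvStepB]
          rw [if_pos hs]
          simp only [if_true]
        rw [hA, hB]
        have := ih (words ++ [(p, w, cur)]) (p + 1) 1 []
        simpa using this
      · have hA : pvStepA estados estado_inicial
            (cur.foldl (pvNfaStep estados) [estado_inicial], p, w, pvEval estados estado_inicial words, cur) c
            = ([estado_inicial], p, w + 1, pvEval estados estado_inicial (words ++ [(p, w, cur)]), ([] : List Char)) := by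
          simp only [pvStepA]
          rw [if_pos hs, if_neg hn, key]
        have hB : pvStepB (words, p, w, cur) c = (words ++ [(p, w, cur)], p, w + 1, ([] : List Char)) := by
          simp only [pvStepB]
          rw [if_pos hs, if_neg hn]
        rw [hA, hB]
        have := ih (words ++ [(p, w, cur)]) p (w + 1) []
        simpa using this
    · have hA : pvStepA estados estado_inicial
          (cur.foldl (pvNfaStep estados) [estado_inicial], p, w, pvEval estados estado_inicial words, cur) c
          = ((cur ++ [c]).foldl (pvNfaStep estados) [estado_inicial], p, w, pvEval estados estado_inicial words, cur ++ [c]) := by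
        simp only [pvStepA]
        rw [if_neg hs]
        simp only [List.foldl_append, List.foldl_cons, List.foldl_nil]
        rfl
      have hB : pvStepB (words, p, w, cur) c = (words, p, w, cur ++ [c]) := by
        simp only [pvStepB]
        rw [if_neg hs]
      rw [hA, hB]
      exact ih words p w (cur ++ [c])

-- ===== VERDICT (by name: the statement is the Claim_ definition above) =====
theorem encontrar_posiciones_spec : Claim_equal_encontrar_posiciones := by
  intro texto estados estado_inicial _
  show encontrar_posiciones texto estados estado_inicial = encontrar_posiciones_alt texto estados estado_inicial
  unfold encontrar_posiciones encontrar_posiciones_alt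
  have h := pv_main estados estado_inicial texto.toList [] 1 1 []
  simp only [List.foldl_nil] at h
  rw [show pvEval estados estado_inicial [] = [] from rfl] at h
  rw [h]
  rfl
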